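-- pv_equiv track=rewrite | github.com/jxjessieli/contextual-distortion-parser | src/compute_move.py | prepare_all_spans
-- ===== SOURCE A (Python) =====
-- def prepare_all_spans(data):
--     all_move_spans = []
--     all_move_indices = []
--     for i in range(len(data)):
--         sentence = data[i]['sent']
--         sent_len = len(sentence)
--         for length in range(1, sent_len+1):
--             for left in range(0, sent_len+1-length):
--                 right = left+length
--                 if left == 0:
--                     front_move_sent =  sentence[left:right] + [','] + sentence[right:]
--                     end_move_sent = sentence[right:] + [','] + sentence[left:right]
--                     front_move_indices = [i for i in range(sent_len+1) if i != (right-left)]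
--                     end_move_indices = [i for i in range(sent_len+1) if i != (sent_len-right)]
--                 elif right == sent_len:
--                     front_move_sent = sentence[left:right] + [','] + sentence[:left]
--                     end_move_sent = sentence[:left] + [','] + sentence[left:right]
--                     front_move_indices = [i for i in range(sent_len+1) if i != (right-left)]
--                     end_move_indices = [i for i in range(sent_len+1) if i != left]
--                 else:
--                     front_move_sent = sentence[left:right] + [','] + sentence[:left] + [','] + sentence[right:]
--                     end_move_sent = sentence[:left] + [','] + sentence[right:] + [','] + sentence[left:right]
--                     front_move_indices = [i for i in range(sent_len+2) if i != (right-left) and i != (right+1)]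
--                     end_move_indices = [i for i in range(sent_len+2) if i != left and i != (sent_len+1+left-right)]
--                 front_span = ' '.join(front_move_sent)
--                 end_span = ' '.join(end_move_sent)
--                 all_move_spans.append(front_span)
--                 all_move_spans.append(end_span)
--                 all_move_indices.append(front_move_indices)
--                 all_move_indices.append(end_move_indices)
--     return all_move_spans, all_move_indices
-- ===== SOURCE B (Python) =====
-- def _assemble(groups):
--     # join groups with a ',' marker between consecutive groups (even empty ones),
--     # recording the output positions of real tokens while walking
--     tokens, idx = [], []
--     for k, g in enumerate(groups):
--         if k:
--             tokens.append(',')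
--         idx.extend(range(len(tokens), len(tokens) + len(g)))
--         tokens.extend(g)
--     return ' '.join(tokens), idx
--
--
-- def prepare_all_spans(data):
--     all_move_spans = []
--     all_move_indices = []
--     for item in data:
--         sentence = item['sent']
--         n = len(sentence)
--         for length in range(1, n + 1):
--             for left in range(0, n + 1 - length):
--                 right = left + length
--                 before = sentence[:left]
--                 mid = sentence[left:right]
--                 after = sentence[right:]
--                 if before and after:
--                     front_groups = [mid, before, after]
--                     end_groups = [before, after, mid]
--                 else:
--                     front_groups = [mid, before + after]
--                     end_groups = [before + after, mid]
--                 front_span, front_idx = _assemble(front_groups)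
--                 end_span, end_idx = _assemble(end_groups)
--                 all_move_spans.append(front_span)
--                 all_move_spans.append(end_span)
--                 all_move_indices.append(front_idx)
--                 all_move_indices.append(end_idx)
--     return all_move_spans, all_move_indices
-- ===== Notes on version B (the rewrite author's own statement) =====
-- stated objective: simpler
-- what changed: B replaces A's three-way branch with per-branch index comprehensions by one uniform assembly helper that concatenates the token groups with a ',' marker between consecutive groups and records the real-token output positions while walking, so the index lists are built structurally from the comma slots instead of filtering a full range per branch.
import Mathlib
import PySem

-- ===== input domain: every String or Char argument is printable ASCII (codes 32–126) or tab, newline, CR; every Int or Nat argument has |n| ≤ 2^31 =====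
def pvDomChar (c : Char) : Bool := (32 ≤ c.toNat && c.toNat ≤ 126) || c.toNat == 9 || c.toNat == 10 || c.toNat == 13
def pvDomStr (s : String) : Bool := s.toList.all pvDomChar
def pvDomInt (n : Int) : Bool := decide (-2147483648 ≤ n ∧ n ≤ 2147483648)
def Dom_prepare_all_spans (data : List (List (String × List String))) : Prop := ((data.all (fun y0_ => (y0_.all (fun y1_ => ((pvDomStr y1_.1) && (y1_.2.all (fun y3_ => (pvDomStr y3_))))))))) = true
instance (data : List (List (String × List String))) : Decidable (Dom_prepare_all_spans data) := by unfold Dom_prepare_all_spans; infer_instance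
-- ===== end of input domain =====

-- B rebuilds each moved span by one uniform group-assembly helper that records the
-- comma-marker slots while concatenating, instead of A's three per-branch index comprehensions
-- (objective: simpler / alternative decomposition; same asymptotic cost).

-- ===== PORT A =====
def prepare_all_spans (data : List (List (String × List String))) : List String × List (List Int) :=
  (PySem.List.pyRange 0 (PySem.List.len data)).foldl (fun (acc : List String × List (List Int)) i =>
    let sentence := PySem.Dict.getD (PySem.Dict.mk (PySem.List.pyGetD data i [])) "sent" []
    let sent_len := PySem.List.len sentence
    (PySem.List.pyRange 1 (sent_len + 1)).foldl (fun acc length =>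
      (PySem.List.pyRange 0 (sent_len + 1 - length)).foldl (fun acc left =>
        let right := left + length
        let t : List String × List String × List Int × List Int :=
          if left = 0 then
            (PySem.List.slice sentence (some left) (some right) ++ [","] ++ PySem.List.slice sentence (some right) none,
             PySem.List.slice sentence (some right) none ++ [","] ++ PySem.List.slice sentence (some left) (some right),
             (PySem.List.pyRange 0 (sent_len + 1)).filter (fun i => i != right - left),
             (PySem.List.pyRange 0 (sent_len + 1)).filter (fun i => i != sent_len - right))
          else if right = sent_len then
            (PySem.List.slice sentence (some left) (some right) ++ [","] ++ PySem.List.slice sentence none (some left),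
             PySem.List.slice sentence none (some left) ++ [","] ++ PySem.List.slice sentence (some left) (some right),
             (PySem.List.pyRange 0 (sent_len + 1)).filter (fun i => i != right - left),
             (PySem.List.pyRange 0 (sent_len + 1)).filter (fun i => i != left))
          else
            (PySem.List.slice sentence (some left) (some right) ++ [","] ++ PySem.List.slice sentence none (some left) ++ [","] ++ PySem.List.slice sentence (some right) none,
             PySem.List.slice sentence none (some left) ++ [","] ++ PySem.List.slice sentence (some right) none ++ [","] ++ PySem.List.slice sentence (some left) (some right),
             (PySem.List.pyRange 0 (sent_len + 2)).filter (fun i => i != right - left && i != right + 1),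
             (PySem.List.pyRange 0 (sent_len + 2)).filter (fun i => i != left && i != sent_len + 1 + left - right))
        let front_span := PySem.Str.join " " t.1
        let end_span := PySem.Str.join " " t.2.1
        (acc.1 ++ [front_span] ++ [end_span], acc.2 ++ [t.2.2.1] ++ [t.2.2.2]))
        acc)
      acc)
    ([], [])

-- ===== PORT B =====
-- helper _assemble of Source B: join groups with a ',' marker between consecutive groups,
-- recording the output positions of the real tokens while walking
def pvAssemble (groups : List (List String)) : String × List Int :=
  let st := (PySem.List.enumerate groups).foldl (fun (st : List String × List Int) kg =>
    let tokens := if kg.1 ≠ 0 then st.1 ++ [","] else st.1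
    let idx := st.2 ++ PySem.List.pyRange (PySem.List.len tokens) (PySem.List.len tokens + PySem.List.len kg.2)
    (tokens ++ kg.2, idx)) ([], [])
  (PySem.Str.join " " st.1, st.2)

def prepare_all_spans_alt (data : List (List (String × List String))) : List String × List (List Int) :=
  data.foldl (fun (acc : List String × List (List Int)) item =>
    let sentence := PySem.Dict.getD (PySem.Dict.mk item) "sent" []
    let n := PySem.List.len sentence
    (PySem.List.pyRange 1 (n + 1)).foldl (fun acc length =>
      (PySem.List.pyRange 0 (n + 1 - length)).foldl (fun acc left =>
        let right := left + length
        let before := PySem.List.slice sentence none (some left)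
        let mid := PySem.List.slice sentence (some left) (some right)
        let after := PySem.List.slice sentence (some right) none
        let g : List (List String) × List (List String) :=
          if before ≠ [] ∧ after ≠ [] then ([mid, before, after], [before, after, mid])
          else ([mid, before ++ after], [before ++ after, mid])
        let f := pvAssemble g.1
        let e := pvAssemble g.2
        (acc.1 ++ [f.1, e.1], acc.2 ++ [f.2, e.2]))
        acc)
      acc)
    ([], [])

-- ===== PRECONDITION & SPEC =====
-- Pre_ excludes inputs where some sentence dict lacks the key 'sent' (Python raises KeyError),
-- and assoc lists with duplicate keys, which a Python dict cannot represent.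
def Pre_prepare_all_spans (data : List (List (String × List String))) : Prop :=
  ∀ item ∈ data, (item.map Prod.fst).Nodup ∧ "sent" ∈ item.map Prod.fst
instance (data : List (List (String × List String))) : Decidable (Pre_prepare_all_spans data) := by unfold Pre_prepare_all_spans; infer_instance

def pvWitness_prepare_all_spans : (List (List (String × List String))) := [[("sent", ["a", "b"])]]

def Spec_prepare_all_spans (data : List (List (String × List String))) (out : List String × List (List Int)) : Prop := out = prepare_all_spans_alt data
instance (data : List (List (String × List String))) (out : List String × List (List Int)) : Decidable (Spec_prepare_all_spans data out) := by unfold Spec_prepare_all_spans; infer_instance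

-- ===== CLAIM (what is proved, stated in full; the proofs are below) =====
def Claim_equal_prepare_all_spans : Prop := ∀ (data : List (List (String × List String))), Dom_prepare_all_spans data → Pre_prepare_all_spans data → Spec_prepare_all_spans data (prepare_all_spans data)


-- ===== LEMMAS AND PROOFS =====

theorem pvAssemble_two (g0 g1 : List String) :
    pvAssemble [g0, g1] =
      (PySem.Str.join " " (g0 ++ [","] ++ g1),
       PySem.List.pyRange 0 (PySem.List.len g0) ++
         PySem.List.pyRange (PySem.List.len g0 + 1) (PySem.List.len g0 + 1 + PySem.List.len g1)) := by
  simp [pvAssemble, PySem.List.enumerate, PySem.List.len_eq]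

theorem pvAssemble_three (g0 g1 g2 : List String) :
    pvAssemble [g0, g1, g2] =
      (PySem.Str.join " " (g0 ++ [","] ++ g1 ++ [","] ++ g2),
       PySem.List.pyRange 0 (PySem.List.len g0) ++
         PySem.List.pyRange (PySem.List.len g0 + 1) (PySem.List.len g0 + 1 + PySem.List.len g1) ++
         PySem.List.pyRange (PySem.List.len g0 + PySem.List.len g1 + 2)
           (PySem.List.len g0 + PySem.List.len g1 + 2 + PySem.List.len g2)) := by
  simp [pvAssemble, PySem.List.enumerate, PySem.List.len_eq]
  ring_nf

theorem pvFilterNeOne (k m : Int) (h0 : 0 ≤ k) (h : k < m) :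
    (PySem.List.pyRange 0 m).filter (fun i => i != k) =
      PySem.List.pyRange 0 k ++ PySem.List.pyRange (k + 1) m := by
  rw [PySem.List.pyRange_one_append 0 k m h0 (le_of_lt h), PySem.List.pyRange_one_cons h,
    List.filter_append, List.filter_cons]
  have h1 : (PySem.List.pyRange 0 k).filter (fun i => i != k) = PySem.List.pyRange 0 k :=
    List.filter_eq_self.mpr (fun a ha => by
      have := PySem.List.mem_pyRange_one.mp ha; simp; omega)
  have h2 : (PySem.List.pyRange (k+1) m).filter (fun i => i != k) = PySem.List.pyRange (k+1) m :=
    List.filter_eq_self.mpr (fun a ha => by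
      have := PySem.List.mem_pyRange_one.mp ha; simp; omega)
  simp [h1, h2]

theorem pvFilterNeTwo (k1 k2 m : Int) (h0 : 0 ≤ k1) (h12 : k1 < k2) (h2 : k2 < m) :
    (PySem.List.pyRange 0 m).filter (fun i => i != k1 && i != k2) =
      PySem.List.pyRange 0 k1 ++ PySem.List.pyRange (k1 + 1) k2 ++ PySem.List.pyRange (k2 + 1) m := by
  rw [PySem.List.pyRange_one_append 0 k1 m h0 (by omega),
    PySem.List.pyRange_one_cons (show k1 < m by omega),
    PySem.List.pyRange_one_append (k1+1) k2 m (by omega) (by omega),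
    PySem.List.pyRange_one_cons h2,
    List.filter_append, List.filter_cons, List.filter_append, List.filter_cons]
  have h3 : (PySem.List.pyRange 0 k1).filter (fun i => i != k1 && i != k2) = PySem.List.pyRange 0 k1 :=
    List.filter_eq_self.mpr (fun a ha => by
      have := PySem.List.mem_pyRange_one.mp ha; simp; omega)
  have h4 : (PySem.List.pyRange (k1+1) k2).filter (fun i => i != k1 && i != k2) = PySem.List.pyRange (k1+1) k2 :=
    List.filter_eq_self.mpr (fun a ha => by
      have := PySem.List.mem_pyRange_one.mp ha; simp; omega)
  have h5 : (PySem.List.pyRange (k2+1) m).filter (fun i => i != k1 && i != k2) = PySem.List.pyRange (k2+1) m :=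
    List.filter_eq_self.mpr (fun a ha => by
      have := PySem.List.mem_pyRange_one.mp ha; simp; omega)
  simp [h3, h4, h5]

-- per-span equality of the four produced values
theorem pvPiece (s : List String) (length left : Int)
    (h1 : 1 ≤ length) (h3 : 0 ≤ left) (h4 : left + length ≤ PySem.List.len s) :
    (let right := left + length
     let t : List String × List String × List Int × List Int :=
       if left = 0 then
         (PySem.List.slice s (some left) (some right) ++ [","] ++ PySem.List.slice s (some right) none,
          PySem.List.slice s (some right) none ++ [","] ++ PySem.List.slice s (some left) (some right),
          (PySem.List.pyRange 0 (PySem.List.len s + 1)).filter (fun i => i != right - left),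
          (PySem.List.pyRange 0 (PySem.List.len s + 1)).filter (fun i => i != PySem.List.len s - right))
       else if right = PySem.List.len s then
         (PySem.List.slice s (some left) (some right) ++ [","] ++ PySem.List.slice s none (some left),
          PySem.List.slice s none (some left) ++ [","] ++ PySem.List.slice s (some left) (some right),
          (PySem.List.pyRange 0 (PySem.List.len s + 1)).filter (fun i => i != right - left),
          (PySem.List.pyRange 0 (PySem.List.len s + 1)).filter (fun i => i != left))
       else
         (PySem.List.slice s (some left) (some right) ++ [","] ++ PySem.List.slice s none (some left) ++ [","] ++ PySem.List.slice s (some right) none,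
          PySem.List.slice s none (some left) ++ [","] ++ PySem.List.slice s (some right) none ++ [","] ++ PySem.List.slice s (some left) (some right),
          (PySem.List.pyRange 0 (PySem.List.len s + 2)).filter (fun i => i != right - left && i != right + 1),
          (PySem.List.pyRange 0 (PySem.List.len s + 2)).filter (fun i => i != left && i != PySem.List.len s + 1 + left - right))
     (PySem.Str.join " " t.1, PySem.Str.join " " t.2.1, t.2.2.1, t.2.2.2)) =
    (let right := left + length
     let before := PySem.List.slice s none (some left)
     let mid := PySem.List.slice s (some left) (some right)
     let after := PySem.List.slice s (some right) none
     let g : List (List String) × List (List String) :=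
       if before ≠ [] ∧ after ≠ [] then ([mid, before, after], [before, after, mid])
       else ([mid, before ++ after], [before ++ after, mid])
     ((pvAssemble g.1).1, (pvAssemble g.2).1, (pvAssemble g.1).2, (pvAssemble g.2).2)) := by
  obtain ⟨l, rfl⟩ : ∃ l : Nat, left = (l : Int) := ⟨left.toNat, (Int.toNat_of_nonneg h3).symm⟩
  obtain ⟨m, rfl⟩ : ∃ m : Nat, length = (m : Int) := ⟨length.toNat, (Int.toNat_of_nonneg (by omega)).symm⟩
  have hm : 1 ≤ m := by exact_mod_cast h1
  have hn : l + m ≤ s.length := by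
    have := h4; rw [PySem.List.len_eq] at this; exact_mod_cast this
  have hright : ((l : Int) + (m : Int)) = ((l + m : Nat) : Int) := by push_cast; ring
  dsimp only
  rw [hright, PySem.List.slice_natCast, PySem.List.slice_to_natCast, PySem.List.slice_from_natCast,
    PySem.List.len_eq]
  have hmid' : l + m - l = m := by omega
  rw [hmid']
  have hlen_mid : PySem.List.len (List.take m (List.drop l s)) = (m : Int) := by
    simp [PySem.List.len_eq]; omega
  have hlen_bef : PySem.List.len (List.take l s) = (l : Int) := by
    simp [PySem.List.len_eq]; omega
  have hlen_aft : PySem.List.len (List.drop (l + m) s) = (s.length : Int) - (l + m : Nat) := by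
    simp [PySem.List.len_eq]; omega
  by_cases hl : l = 0
  · subst hl
    norm_num
    have hlm : PySem.List.len (List.take m s) = (m : Int) := by simp [PySem.List.len_eq]; omega
    have hla : PySem.List.len (List.drop m s) = (s.length : Int) - m := by simp [PySem.List.len_eq]; omega
    simp only [pvAssemble_two, hlm, hla]
    refine ⟨by simp, by simp, ?_, ?_⟩
    · rw [show ((m:Int)+1+((s.length:Int)-(m:Int))) = ((s.length:Int)+1) from by ring]
      exact pvFilterNeOne _ _ (by omega) (by omega)
    · rw [show (((s.length:Int)-(m:Int))+1+(m:Int)) = ((s.length:Int)+1) from by ring]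
      exact pvFilterNeOne _ _ (by omega) (by omega)
  · -- l ≠ 0
    have hsne : s ≠ [] := by intro h; subst h; simp at hn; omega
    have hbne : List.take l s ≠ [] := by simp [List.take_eq_nil_iff, hl, hsne]
    rw [if_neg (by exact_mod_cast hl)]
    by_cases hr : l + m = s.length
    · have haft : List.drop (l + m) s = ([] : List String) := by
        rw [List.drop_eq_nil_iff]; omega
      rw [if_pos (by exact_mod_cast hr), haft]
      norm_num
      simp only [pvAssemble_two, hlen_mid, hlen_bef]
      refine ⟨by simp, by simp, ?_, ?_⟩
      · rw [show ((m:Int)+1+(l:Int)) = ((s.length:Int)+1) from by omega]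
        exact pvFilterNeOne _ _ (by omega) (by omega)
      · rw [show ((l:Int)+1+(m:Int)) = ((s.length:Int)+1) from by omega]
        exact pvFilterNeOne _ _ (by omega) (by omega)
    · have hane : List.drop (l + m) s ≠ [] := by
        rw [ne_eq, List.drop_eq_nil_iff]; omega
      rw [if_neg (by exact_mod_cast hr), if_pos ⟨hbne, hane⟩]
      simp only [pvAssemble_three, hlen_mid, hlen_bef, hlen_aft, Nat.cast_add, add_sub_cancel_left,
        Prod.mk.injEq]
      refine ⟨by simp, by simp, ?_, ?_⟩
      · rw [pvFilterNeTwo _ _ _ (by omega) (by omega) (by omega)]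
        ring_nf
      · rw [pvFilterNeTwo _ _ _ (by omega) (by omega) (by omega)]
        ring_nf

theorem prepare_all_spans_spec : Claim_equal_prepare_all_spans := by
  intro data _ _
  unfold Spec_prepare_all_spans
  have hA : prepare_all_spans data =
      data.foldl (fun (acc : List String × List (List Int)) item =>
      let sentence := PySem.Dict.getD (PySem.Dict.mk item) "sent" []
      let sent_len := PySem.List.len sentence
      (PySem.List.pyRange 1 (sent_len + 1)).foldl (fun acc length =>
        (PySem.List.pyRange 0 (sent_len + 1 - length)).foldl (fun acc left =>
          let right := left + length
          let t : List String × List String × List Int × List Int :=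
            if left = 0 then
              (PySem.List.slice sentence (some left) (some right) ++ [","] ++ PySem.List.slice sentence (some right) none,
               PySem.List.slice sentence (some right) none ++ [","] ++ PySem.List.slice sentence (some left) (some right),
               (PySem.List.pyRange 0 (sent_len + 1)).filter (fun i => i != right - left),
               (PySem.List.pyRange 0 (sent_len + 1)).filter (fun i => i != sent_len - right))
            else if right = sent_len then
              (PySem.List.slice sentence (some left) (some right) ++ [","] ++ PySem.List.slice sentence none (some left),
               PySem.List.slice sentence none (some left) ++ [","] ++ PySem.List.slice sentence (some left) (some right),
               (PySem.List.pyRange 0 (sent_len + 1)).filter (fun i => i != right - left),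
               (PySem.List.pyRange 0 (sent_len + 1)).filter (fun i => i != left))
            else
              (PySem.List.slice sentence (some left) (some right) ++ [","] ++ PySem.List.slice sentence none (some left) ++ [","] ++ PySem.List.slice sentence (some right) none,
               PySem.List.slice sentence none (some left) ++ [","] ++ PySem.List.slice sentence (some right) none ++ [","] ++ PySem.List.slice sentence (some left) (some right),
               (PySem.List.pyRange 0 (sent_len + 2)).filter (fun i => i != right - left && i != right + 1),
               (PySem.List.pyRange 0 (sent_len + 2)).filter (fun i => i != left && i != sent_len + 1 + left - right))
          let front_span := PySem.Str.join " " t.1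
          let end_span := PySem.Str.join " " t.2.1
          (acc.1 ++ [front_span] ++ [end_span], acc.2 ++ [t.2.2.1] ++ [t.2.2.2]))
          acc)
        acc) ([], []) := by
    unfold prepare_all_spans
    have := PySem.List.foldl_pyRange_pyGetD data ([] : List (String × List String))
      (fun (acc : List String × List (List Int)) item =>
      let sentence := PySem.Dict.getD (PySem.Dict.mk item) "sent" []
      let sent_len := PySem.List.len sentence
      (PySem.List.pyRange 1 (sent_len + 1)).foldl (fun acc length =>
        (PySem.List.pyRange 0 (sent_len + 1 - length)).foldl (fun acc left =>
          let right := left + length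
          let t : List String × List String × List Int × List Int :=
            if left = 0 then
              (PySem.List.slice sentence (some left) (some right) ++ [","] ++ PySem.List.slice sentence (some right) none,
               PySem.List.slice sentence (some right) none ++ [","] ++ PySem.List.slice sentence (some left) (some right),
               (PySem.List.pyRange 0 (sent_len + 1)).filter (fun i => i != right - left),
               (PySem.List.pyRange 0 (sent_len + 1)).filter (fun i => i != sent_len - right))
            else if right = sent_len then
              (PySem.List.slice sentence (some left) (some right) ++ [","] ++ PySem.List.slice sentence none (some left),
               PySem.List.slice sentence none (some left) ++ [","] ++ PySem.List.slice sentence (some left) (some right),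
               (PySem.List.pyRange 0 (sent_len + 1)).filter (fun i => i != right - left),
               (PySem.List.pyRange 0 (sent_len + 1)).filter (fun i => i != left))
            else
              (PySem.List.slice sentence (some left) (some right) ++ [","] ++ PySem.List.slice sentence none (some left) ++ [","] ++ PySem.List.slice sentence (some right) none,
               PySem.List.slice sentence none (some left) ++ [","] ++ PySem.List.slice sentence (some right) none ++ [","] ++ PySem.List.slice sentence (some left) (some right),
               (PySem.List.pyRange 0 (sent_len + 2)).filter (fun i => i != right - left && i != right + 1),
               (PySem.List.pyRange 0 (sent_len + 2)).filter (fun i => i != left && i != sent_len + 1 + left - right))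
          let front_span := PySem.Str.join " " t.1
          let end_span := PySem.Str.join " " t.2.1
          (acc.1 ++ [front_span] ++ [end_span], acc.2 ++ [t.2.2.1] ++ [t.2.2.2]))
          acc)
        acc) ([], []) (le_refl 0)
    rw [Int.toNat_zero, List.drop_zero] at this
    exact this
  rw [hA]
  unfold prepare_all_spans_alt
  apply PySem.List.foldl_congr_mem
  intro acc item _
  dsimp only
  generalize PySem.Dict.getD (PySem.Dict.mk item) "sent" [] = s
  apply PySem.List.foldl_congr_mem
  intro acc1 length hlen
  apply PySem.List.foldl_congr_mem
  intro acc2 left hleft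
  rw [PySem.List.mem_pyRange_one] at hlen hleft
  have hp := pvPiece s length left (by omega) (by omega) (by omega)
  dsimp only at hp ⊢
  simp only [Prod.mk.injEq] at hp
  obtain ⟨e1, e2, e3, e4⟩ := hp
  rw [e1, e2, e3, e4]
  simp
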